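-- pv_equiv track=rewrite | github.com/codyc-xyz/leet-code | arrays_and_hashing/problems/822_card_flipping_game.py | flipgame
-- ===== SOURCE A (Python) =====
-- from typing import List
--
-- def flipgame(fronts: List[int], backs: List[int]) -> int:
--
--     if fronts == backs:
--         return 0
--
--     notAns = set()
--     ans = set()
--
--     for i in range(len(fronts)):
--         if fronts[i] == backs[i]:
--             if fronts[i] in ans:
--                 ans.remove(fronts[i])
--             notAns.add(fronts[i])
--         else:
--             if fronts[i] not in notAns:
--                 ans.add(fronts[i])
--             if backs[i] not in notAns:
--                 ans.add(backs[i])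
--     return min(ans) if ans else 0
-- ===== SOURCE B (Python) =====
-- from typing import List
--
-- def flipgame(fronts: List[int], backs: List[int]) -> int:
--     forbidden = set()
--     for i in range(len(fronts)):
--         if fronts[i] == backs[i]:
--             forbidden.add(fronts[i])
--     best = None
--     for i in range(len(fronts)):
--         for x in (fronts[i], backs[i]):
--             if x not in forbidden and (best is None or x < best):
--                 best = x
--     return best if best is not None else 0
-- ===== Notes on version B (the rewrite author's own statement) =====
-- stated objective: simpler
-- what changed: Replaces A's early fronts==backs check and its incremental candidate-set add/remove bookkeeping with two plain passes: first collect the forbidden values (equal-faced cards), then a running minimum over all faces not in that set.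
import Mathlib
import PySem

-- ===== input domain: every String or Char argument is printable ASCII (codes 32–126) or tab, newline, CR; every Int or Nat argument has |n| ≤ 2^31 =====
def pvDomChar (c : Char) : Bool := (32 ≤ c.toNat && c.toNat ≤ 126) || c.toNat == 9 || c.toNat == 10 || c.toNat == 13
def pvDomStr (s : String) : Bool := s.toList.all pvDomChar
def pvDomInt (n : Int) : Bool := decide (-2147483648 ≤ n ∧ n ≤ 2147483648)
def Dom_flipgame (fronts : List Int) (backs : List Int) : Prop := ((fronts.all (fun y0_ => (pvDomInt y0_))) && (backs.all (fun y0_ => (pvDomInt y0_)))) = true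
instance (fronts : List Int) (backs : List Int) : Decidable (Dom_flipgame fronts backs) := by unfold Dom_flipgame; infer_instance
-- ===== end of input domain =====

-- B replaces A's early-equality check and incremental candidate add/remove bookkeeping by two
-- plain passes (forbidden set, then running minimum); objective: simpler, same O(n) cost.

-- ===== PORT A =====
-- one loop step of A: state = (notAns, ans)
def flipgameStepA (st : PySem.Set Int × PySem.Set Int) (f b : Int) :
    PySem.Set Int × PySem.Set Int :=
  if f = b then
    (PySem.Set.add st.1 f, PySem.Set.discard st.2 f)
  else
    let a1 := if PySem.Set.contains st.1 f then st.2 else PySem.Set.add st.2 f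
    let a2 := if PySem.Set.contains st.1 b then a1 else PySem.Set.add a1 b
    (st.1, a2)

def flipgame (fronts : List Int) (backs : List Int) : Int :=
  if fronts = backs then 0
  else
    let st := (PySem.List.pyRange 0 (PySem.List.len fronts) 1).foldl
      (fun st i => flipgameStepA st (PySem.List.pyGetD fronts i 0) (PySem.List.pyGetD backs i 0))
      (PySem.Set.empty, PySem.Set.empty)
    match PySem.List.min? st.2 (fun x => x) with
    | some m => m
    | none => 0

-- ===== PORT B =====
-- inner candidate update of B's second loop: best := x if x allowed and smaller
def flipgameUpd (forbidden : PySem.Set Int) (best : Option Int) (x : Int) : Option Int :=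
  if PySem.Set.contains forbidden x = false ∧ (∀ m ∈ best, x < m) then some x else best

def flipgame_alt (fronts : List Int) (backs : List Int) : Int :=
  let forbidden : PySem.Set Int := (PySem.List.pyRange 0 (PySem.List.len fronts) 1).foldl
    (fun s i =>
      if PySem.List.pyGetD fronts i 0 = PySem.List.pyGetD backs i 0 then
        PySem.Set.add s (PySem.List.pyGetD fronts i 0)
      else s)
    PySem.Set.empty
  let best := (PySem.List.pyRange 0 (PySem.List.len fronts) 1).foldl
    (fun best i =>
      flipgameUpd forbidden (flipgameUpd forbidden best (PySem.List.pyGetD fronts i 0))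
        (PySem.List.pyGetD backs i 0))
    none
  best.getD 0

-- ===== PRECONDITION & SPEC =====
-- Pre_ excludes only inputs on which A raises IndexError: backs shorter than fronts.
def Pre_flipgame (fronts : List Int) (backs : List Int) : Prop := fronts.length ≤ backs.length
instance (fronts : List Int) (backs : List Int) : Decidable (Pre_flipgame fronts backs) := by
  unfold Pre_flipgame; infer_instance

def pvWitness_flipgame : List Int × List Int := ([1, 2, 4, 4, 7], [1, 3, 4, 1, 3])

def Spec_flipgame (fronts : List Int) (backs : List Int) (out : Int) : Prop := out = flipgame_alt fronts backs
instance (fronts : List Int) (backs : List Int) (out : Int) : Decidable (Spec_flipgame fronts backs out) := by unfold Spec_flipgame; infer_instance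

-- ===== CLAIM (what is proved, stated in full; the proofs are below) =====
def Claim_equal_flipgame : Prop := ∀ (fronts : List Int) (backs : List Int), Dom_flipgame fronts backs → Pre_flipgame fronts backs → Spec_flipgame fronts backs (flipgame fronts backs)

-- ===== LEMMAS AND PROOFS =====

-- pair-membership predicates over the zipped card list
def pvEqMem (L : List (Int × Int)) (x : Int) : Prop := ∃ p ∈ L, p.1 = p.2 ∧ x = p.1
def pvNE (L : List (Int × Int)) (x : Int) : Prop := ∃ p ∈ L, p.1 ≠ p.2 ∧ (x = p.1 ∨ x = p.2)
def pvFace (L : List (Int × Int)) (x : Int) : Prop := ∃ p ∈ L, x = p.1 ∨ x = p.2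

lemma pvEqMem_cons (p : Int × Int) (L : List (Int × Int)) (x : Int) :
    pvEqMem (p :: L) x ↔ (p.1 = p.2 ∧ x = p.1) ∨ pvEqMem L x := by
  simp [pvEqMem]

lemma pvNE_cons (p : Int × Int) (L : List (Int × Int)) (x : Int) :
    pvNE (p :: L) x ↔ (p.1 ≠ p.2 ∧ (x = p.1 ∨ x = p.2)) ∨ pvNE L x := by
  simp [pvNE]

-- an index loop over fronts[i], backs[i] is a fold over the zipped pairs
lemma pv_zipfold {σ : Type} (step : σ → Int → Int → σ) (fronts backs : List Int)
    (h : fronts.length ≤ backs.length) (init : σ) :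
    (PySem.List.pyRange 0 (PySem.List.len fronts) 1).foldl
      (fun acc i => step acc (PySem.List.pyGetD fronts i 0) (PySem.List.pyGetD backs i 0)) init
    = (fronts.zip backs).foldl (fun acc p => step acc p.1 p.2) init := by
  have hlen : (fronts.zip backs).length = fronts.length := by
    rw [List.length_zip]; omega
  have hrange : PySem.List.pyRange 0 (PySem.List.len fronts) 1
      = PySem.List.pyRange 0 (((fronts.zip backs).length : Int)) 1 := by
    simp [PySem.List.len, hlen]
  have hcong : ∀ (acc : σ), ∀ i ∈ PySem.List.pyRange 0 (((fronts.zip backs).length : Int)) 1,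
      step acc (PySem.List.pyGetD fronts i 0) (PySem.List.pyGetD backs i 0)
      = (fun acc (p : Int × Int) => step acc p.1 p.2) acc
          (PySem.List.pyGetD (fronts.zip backs) i (0, 0)) := by
    intro acc i hi
    rw [PySem.List.mem_pyRange_one] at hi
    obtain ⟨h0, h1⟩ := hi
    have hif : i < (fronts.length : Int) := by omega
    have hib : i < (backs.length : Int) := by
      have : (fronts.length : Int) ≤ (backs.length : Int) := by exact_mod_cast h
      omega
    rw [PySem.List.pyGetD_eq_getElem _ _ h0 h1, PySem.List.pyGetD_eq_getElem _ _ h0 hif,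
      PySem.List.pyGetD_eq_getElem _ _ h0 hib]
    simp [List.getElem_zip]
  rw [hrange, PySem.List.foldl_congr_mem _ _ _ init hcong]
  exact PySem.List.foldl_pyRange_zero_pyGetD' (fronts.zip backs) (0, 0)
    (fun acc p => step acc p.1 p.2) init

-- ----- A's loop over pairs -----
def pvLoopA (L : List (Int × Int)) (st : PySem.Set Int × PySem.Set Int) :
    PySem.Set Int × PySem.Set Int :=
  L.foldl (fun st p => flipgameStepA st p.1 p.2) st

lemma pv_stepA_snd_mem (na a : PySem.Set Int) (f b : Int) (hfb : f ≠ b) (x : Int) :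
    x ∈ (flipgameStepA (na, a) f b).2 ↔ x ∈ a ∨ (x = f ∧ f ∉ na) ∨ (x = b ∧ b ∉ na) := by
  simp only [flipgameStepA, if_neg hfb]
  by_cases h1 : PySem.Set.contains na f = true <;> by_cases h2 : PySem.Set.contains na b = true <;>
    simp_all [PySem.Set.mem_add, PySem.Set.contains_iff] <;> tauto

set_option maxHeartbeats 1000000 in
lemma pvLoopA_mem (L : List (Int × Int)) : ∀ (na a : PySem.Set Int) (x : Int),
    a.Nodup →
    ((x ∈ (pvLoopA L (na, a)).1 ↔ (x ∈ na ∨ pvEqMem L x))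
     ∧ (x ∈ (pvLoopA L (na, a)).2 ↔ (¬ pvEqMem L x ∧ (x ∈ a ∨ (x ∉ na ∧ pvNE L x))))) := by
  induction L with
  | nil =>
    intro na a x _
    simp [pvLoopA, pvEqMem, pvNE]
  | cons p L ih =>
    intro na a x hnd
    by_cases hp : p.1 = p.2
    · have hstep : pvLoopA (p :: L) (na, a)
          = pvLoopA L (PySem.Set.add na p.1, PySem.Set.discard a p.1) := by
        simp [pvLoopA, flipgameStepA, hp]
      obtain ⟨ih1, ih2⟩ := ih (PySem.Set.add na p.1) (PySem.Set.discard a p.1) x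
        (PySem.Set.nodup_discard a p.1 hnd)
      rw [hstep]
      constructor
      · rw [ih1, PySem.Set.mem_add, pvEqMem_cons]
        tauto
      · rw [ih2, PySem.Set.mem_discard, PySem.Set.mem_add, pvEqMem_cons, pvNE_cons]
        by_cases hx : x = p.1 <;> simp [hx, hp] <;> tauto
    · have hfst : (flipgameStepA (na, a) p.1 p.2).1 = na := by
        simp [flipgameStepA, if_neg hp]
      have hstep : pvLoopA (p :: L) (na, a)
          = pvLoopA L (na, (flipgameStepA (na, a) p.1 p.2).2) := by
        simp only [pvLoopA, List.foldl_cons]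
        rw [show flipgameStepA (na, a) p.1 p.2
            = ((flipgameStepA (na, a) p.1 p.2).1, (flipgameStepA (na, a) p.1 p.2).2) from rfl,
          hfst]
      have hnd2 : ((flipgameStepA (na, a) p.1 p.2).2 : PySem.Set Int).Nodup := by
        simp only [flipgameStepA, if_neg hp]
        split_ifs <;>
          first
            | exact hnd
            | exact PySem.Set.nodup_add _ _ hnd
            | exact PySem.Set.nodup_add _ _ (PySem.Set.nodup_add _ _ hnd)
      obtain ⟨ih1, ih2⟩ := ih na (flipgameStepA (na, a) p.1 p.2).2 x hnd2
      rw [hstep]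
      constructor
      · rw [ih1, pvEqMem_cons]
        tauto
      · rw [ih2, pv_stepA_snd_mem na a p.1 p.2 hp, pvEqMem_cons, pvNE_cons]
        by_cases hx1 : x = p.1 <;> by_cases hx2 : x = p.2 <;>
          simp [hx1, hx2, hp] <;> tauto

-- ----- B's forbidden loop over pairs -----
def pvLoopF (L : List (Int × Int)) (s : PySem.Set Int) : PySem.Set Int :=
  L.foldl (fun s p => if p.1 = p.2 then PySem.Set.add s p.1 else s) s

lemma pvLoopF_mem (L : List (Int × Int)) : ∀ (s : PySem.Set Int) (x : Int),
    x ∈ pvLoopF L s ↔ x ∈ s ∨ pvEqMem L x := by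
  induction L with
  | nil => intro s x; simp [pvLoopF, pvEqMem]
  | cons p L ih =>
    intro s x
    have hstep : pvLoopF (p :: L) s
        = pvLoopF L (if p.1 = p.2 then PySem.Set.add s p.1 else s) := rfl
    rw [hstep, ih, pvEqMem_cons]
    by_cases hp : p.1 = p.2 <;> simp [hp, PySem.Set.mem_add] <;> tauto

-- ----- B's minimum loop -----
def pvMinUpd (b : Option Int) (x : Int) : Option Int :=
  if ∀ m ∈ b, x < m then some x else b

def pvLoopM (F : PySem.Set Int) (L : List (Int × Int)) (b : Option Int) : Option Int :=
  L.foldl (fun b p => flipgameUpd F (flipgameUpd F b p.1) p.2) b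

def pvCands (F : PySem.Set Int) (L : List (Int × Int)) : List Int :=
  (L.flatMap (fun p => [p.1, p.2])).filter (fun x => !PySem.Set.contains F x)

lemma pvUpdF_eq (F : PySem.Set Int) (b : Option Int) (x : Int) :
    flipgameUpd F b x = if PySem.Set.contains F x = false then pvMinUpd b x else b := by
  unfold flipgameUpd pvMinUpd
  split_ifs <;> simp_all

lemma mem_pvCands (F : PySem.Set Int) (L : List (Int × Int)) (x : Int) :
    x ∈ pvCands F L ↔ pvFace L x ∧ PySem.Set.contains F x = false := by
  simp [pvCands, List.mem_filter, List.mem_flatMap, pvFace]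

lemma pvLoopM_eq (F : PySem.Set Int) (L : List (Int × Int)) : ∀ (b : Option Int),
    pvLoopM F L b = (pvCands F L).foldl pvMinUpd b := by
  induction L with
  | nil => intro b; rfl
  | cons p L ih =>
    intro b
    have hstep : pvLoopM F (p :: L) b = pvLoopM F L (flipgameUpd F (flipgameUpd F b p.1) p.2) := rfl
    have hcand : pvCands F (p :: L)
        = ([p.1, p.2].filter (fun x => !PySem.Set.contains F x)) ++ pvCands F L := by
      unfold pvCands
      rw [List.flatMap_cons, List.filter_append]
    rw [hstep, ih, hcand, List.foldl_append]
    congr 1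
    rw [pvUpdF_eq, pvUpdF_eq]
    by_cases hm1 : p.1 ∈ F <;> by_cases hm2 : p.2 ∈ F <;>
      simp [List.filter_cons, hm1, hm2]

lemma pvMinUpd_cases (b : Option Int) (x : Int) :
    (pvMinUpd b x = some x ∧ ∀ k ∈ b, x ≤ k) ∨ (pvMinUpd b x = b ∧ ∃ k ∈ b, k ≤ x) := by
  unfold pvMinUpd
  split_ifs with h
  · exact Or.inl ⟨rfl, fun k hk => le_of_lt (h k hk)⟩
  · push_neg at h
    obtain ⟨k, hk, hle⟩ := h
    exact Or.inr ⟨rfl, k, hk, hle⟩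

lemma pvFoldMin_spec (C : List Int) : ∀ (b : Option Int),
    (C.foldl pvMinUpd b = none ↔ b = none ∧ C = [])
    ∧ (∀ m, C.foldl pvMinUpd b = some m →
        (b = some m ∨ m ∈ C) ∧ (∀ k, b = some k → m ≤ k) ∧ (∀ y ∈ C, m ≤ y)) := by
  induction C with
  | nil =>
    intro b
    refine ⟨by simp, ?_⟩
    intro m hm
    simp only [List.foldl_nil] at hm
    refine ⟨Or.inl hm, ?_, by simp⟩
    intro k hk
    rw [hm] at hk
    injection hk with hk
    omega
  | cons x C ih =>
    intro b
    have hx : List.foldl pvMinUpd b (x :: C) = List.foldl pvMinUpd (pvMinUpd b x) C := rfl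
    obtain ⟨ihn, ihs⟩ := ih (pvMinUpd b x)
    rcases pvMinUpd_cases b x with ⟨hupd, hall⟩ | ⟨hupd, k0, hk0, hk0x⟩
    · -- updated: pvMinUpd b x = some x
      constructor
      · rw [hx, ihn, hupd]
        simp
      · intro m hm
        rw [hx] at hm
        obtain ⟨hmem, hble, hCle⟩ := ihs m hm
        rw [hupd] at hmem hble
        have hmx : m ≤ x := hble x rfl
        refine ⟨?_, ?_, ?_⟩
        · rcases hmem with h | h
          · injection h with h
            exact Or.inr (h ▸ List.mem_cons_self)
          · exact Or.inr (List.mem_cons_of_mem _ h)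
        · intro k hk
          have hxk : x ≤ k := hall k (by rw [hk]; rfl)
          omega
        · intro y hy
          rcases List.mem_cons.mp hy with h | h
          · omega
          · exact hCle y h
    · -- kept: pvMinUpd b x = b, and b = some k0 with k0 ≤ x
      have hb : b = some k0 := hk0
      constructor
      · rw [hx, ihn, hupd, hb]
        simp
      · intro m hm
        rw [hx] at hm
        obtain ⟨hmem, hble, hCle⟩ := ihs m hm
        rw [hupd] at hmem hble
        have hmk0 : m ≤ k0 := hble k0 hb
        refine ⟨?_, hble, ?_⟩
        · rcases hmem with h | h
          · exact Or.inl h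
          · exact Or.inr (List.mem_cons_of_mem _ h)
        · intro y hy
          rcases List.mem_cons.mp hy with h | h
          · omega
          · exact hCle y h

-- a non-forbidden face always lies on a card with distinct faces
lemma pvFace_iff_pvNE (L : List (Int × Int)) (x : Int) :
    pvFace L x ∧ ¬ pvEqMem L x ↔ pvNE L x ∧ ¬ pvEqMem L x := by
  constructor
  · rintro ⟨⟨p, hp, hx⟩, hne⟩
    refine ⟨⟨p, hp, ?_, hx⟩, hne⟩
    intro heq
    apply hne
    exact ⟨p, hp, heq, by rcases hx with h | h <;> omega⟩
  · rintro ⟨⟨p, hp, _, hx⟩, hne⟩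
    exact ⟨⟨p, hp, hx⟩, hne⟩

lemma pv_zip_self_eq (l : List Int) (p : Int × Int) (h : p ∈ l.zip l) : p.1 = p.2 := by
  obtain ⟨i, hi, rfl⟩ := List.getElem_of_mem h
  simp [List.getElem_zip]

-- ===== VERDICT (by name: the statement is the Claim_ definition above) =====
theorem flipgame_spec : Claim_equal_flipgame := by
  unfold Claim_equal_flipgame
  intro fronts backs _ hpre
  unfold Pre_flipgame at hpre
  unfold Spec_flipgame
  -- rewrite both ports as folds over the zipped pairs
  have eA : flipgame fronts backs
      = (if fronts = backs then 0 else
          match PySem.List.min? (pvLoopA (fronts.zip backs) (PySem.Set.empty, PySem.Set.empty)).2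
              (fun x => x) with
          | some m => m
          | none => 0) := by
    unfold flipgame pvLoopA
    rw [pv_zipfold flipgameStepA fronts backs hpre]
  have eF : (PySem.List.pyRange 0 (PySem.List.len fronts) 1).foldl
        (fun s i =>
          if PySem.List.pyGetD fronts i 0 = PySem.List.pyGetD backs i 0 then
            PySem.Set.add s (PySem.List.pyGetD fronts i 0)
          else s)
        PySem.Set.empty
      = pvLoopF (fronts.zip backs) PySem.Set.empty := by
    unfold pvLoopF
    exact pv_zipfold (fun s f b => if f = b then PySem.Set.add s f else s) fronts backs hpre _
  have eB : flipgame_alt fronts backs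
      = (pvLoopM (pvLoopF (fronts.zip backs) PySem.Set.empty) (fronts.zip backs) none).getD 0 := by
    unfold flipgame_alt
    dsimp only
    rw [eF]
    unfold pvLoopM
    exact congrArg (fun o : Option Int => o.getD 0)
      (pv_zipfold (fun b f bb =>
        flipgameUpd (pvLoopF (fronts.zip backs) PySem.Set.empty)
          (flipgameUpd (pvLoopF (fronts.zip backs) PySem.Set.empty) b f) bb) fronts backs hpre none)
  set L := fronts.zip backs with hL
  set F := pvLoopF L PySem.Set.empty with hF
  -- membership characterisations
  have hFmem : ∀ x, x ∈ F ↔ pvEqMem L x := by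
    intro x
    rw [hF, pvLoopF_mem]
    simp [PySem.Set.empty]
  have hAmem : ∀ x, x ∈ (pvLoopA L (PySem.Set.empty, PySem.Set.empty)).2
      ↔ (¬ pvEqMem L x ∧ pvNE L x) := by
    intro x
    have := (pvLoopA_mem L PySem.Set.empty PySem.Set.empty x (by simp [PySem.Set.empty])).2
    rw [this]
    simp [PySem.Set.empty]
  have hCmem : ∀ x, x ∈ pvCands F L ↔ x ∈ (pvLoopA L (PySem.Set.empty, PySem.Set.empty)).2 := by
    intro x
    rw [mem_pvCands, hAmem]
    have hcf : PySem.Set.contains F x = false ↔ ¬ pvEqMem L x := by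
      rw [← hFmem x]
      constructor
      · intro h hmem
        rw [← PySem.Set.contains_iff, h] at hmem
        cases hmem
      · intro h
        cases hc : PySem.Set.contains F x
        · rfl
        · exact absurd ((PySem.Set.contains_iff F x).mp hc) h
    rw [hcf, pvFace_iff_pvNE]
    tauto
  rw [eA, eB, pvLoopM_eq]
  by_cases heq : fronts = backs
  · -- all cards have equal faces: both sides are 0
    rw [if_pos heq]
    have hallEq : ∀ p ∈ L, p.1 = p.2 := by
      intro p hp
      rw [hL, heq] at hp
      exact pv_zip_self_eq backs p hp
    have hCnil : pvCands F L = [] := by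
      rw [List.eq_nil_iff_forall_not_mem]
      intro x hx
      rw [mem_pvCands] at hx
      obtain ⟨⟨p, hp, hxp⟩, hcf⟩ := hx
      have hpe := hallEq p hp
      have : x ∈ F := by
        rw [hFmem]
        exact ⟨p, hp, hpe, by rcases hxp with h | h <;> omega⟩
      rw [← PySem.Set.contains_iff] at this
      rw [this] at hcf
      cases hcf
    rw [hCnil]
    rfl
  · rw [if_neg heq]
    rcases hmin : PySem.List.min? (pvLoopA L (PySem.Set.empty, PySem.Set.empty)).2 (fun x => x)
      with _ | m
    · -- ans empty: candidates empty too
      rw [PySem.List.min?_eq_none_iff] at hmin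
      have hCnil : pvCands F L = [] := by
        rw [List.eq_nil_iff_forall_not_mem]
        intro x hx
        rw [hCmem, hmin] at hx
        cases hx
      rw [hCnil]
      rfl
    · have hmAns := PySem.List.min?_mem hmin
      have hmMin := PySem.List.min?_isMin hmin
      have hmC : m ∈ pvCands F L := (hCmem m).mpr hmAns
      rcases hr : (pvCands F L).foldl pvMinUpd none with _ | m'
      · exfalso
        have := ((pvFoldMin_spec (pvCands F L) none).1).mp hr
        rw [this.2] at hmC
        cases hmC
      · obtain ⟨hmem, _, hle⟩ := (pvFoldMin_spec (pvCands F L) none).2 m' hr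
        have hm'C : m' ∈ pvCands F L := by
          rcases hmem with h | h
          · cases h
          · exact h
        have h1 : m ≤ m' := hmMin m' ((hCmem m').mp hm'C)
        have h2 : m' ≤ m := hle m hmC
        simp only [Option.getD_some]
        omega
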